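-- pv_equiv track=rewrite | github.com/lzyamos/medicheck | medicheck-api/app/services/rules_engine.py | _pick_best_triage
-- ===== SOURCE A (Python) =====
-- from typing import Any, Dict, List, Optional, Tuple
--
-- TRIAGE_RANK = {
--     "emergency": 4,
--     "urgent": 3,
--     "routine": 2,
--     "self_care": 1,
--     "unknown": 0,
-- }
--
-- def _pick_best_triage(triage_list: List[Dict[str, Any]]) -> Dict[str, Any]:
--     if not triage_list:
--         return {"level": "unknown", "reason": "No matching triage rules."}
--     best = triage_list[0]
--     best_rank = TRIAGE_RANK.get(str(best.get("level", "unknown")), 0)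
--
--     for t in triage_list[1:]:
--         rank = TRIAGE_RANK.get(str(t.get("level", "unknown")), 0)
--         if rank > best_rank:
--             best = t
--             best_rank = rank
--
--     return best
-- ===== SOURCE B (Python) =====
-- from typing import Any, Dict, List
--
-- TRIAGE_RANK = {
--     "emergency": 4,
--     "urgent": 3,
--     "routine": 2,
--     "self_care": 1,
--     "unknown": 0,
-- }
--
-- def _pick_best_triage(triage_list: List[Dict[str, Any]]) -> Dict[str, Any]:
--     if not triage_list:
--         return {"level": "unknown", "reason": "No matching triage rules."}
--     # two staged passes: compute all ranks, take the maximum, then return the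
--     # first dict whose rank equals it (matches A's first-occurrence tie-break)
--     ranks = [TRIAGE_RANK.get(str(t.get("level", "unknown")), 0) for t in triage_list]
--     best_rank = max(ranks)
--     return next(t for t, r in zip(triage_list, ranks) if r == best_rank)
-- ===== Notes on version B (the rewrite author's own statement) =====
-- stated objective: alternative
-- what changed: Replaces A's single-pass best/best_rank accumulator loop with staged passes: map every dict to its rank, take max of that list, then return the first dict whose rank equals the maximum.
import Mathlib
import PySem

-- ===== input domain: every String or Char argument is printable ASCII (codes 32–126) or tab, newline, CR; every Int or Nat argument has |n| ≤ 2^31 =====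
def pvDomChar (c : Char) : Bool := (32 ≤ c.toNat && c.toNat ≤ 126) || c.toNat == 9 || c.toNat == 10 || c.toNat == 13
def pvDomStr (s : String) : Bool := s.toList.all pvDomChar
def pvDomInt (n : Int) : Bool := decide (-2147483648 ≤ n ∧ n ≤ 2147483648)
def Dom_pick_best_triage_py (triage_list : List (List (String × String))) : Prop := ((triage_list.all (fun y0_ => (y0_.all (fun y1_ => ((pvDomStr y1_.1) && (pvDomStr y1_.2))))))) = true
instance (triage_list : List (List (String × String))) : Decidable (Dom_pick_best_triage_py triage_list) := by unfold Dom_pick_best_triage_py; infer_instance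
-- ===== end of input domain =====

-- B replaces A's single-pass best/best_rank accumulator with staged passes:
-- map to ranks, take the max, return the first dict of maximal rank (objective: alternative).


-- ===== PORT A =====
-- module constant TRIAGE_RANK (shared context of both Pythons)
def TRIAGE_RANK : PySem.Dict String Int :=
  PySem.Dict.ofList [("emergency", 4), ("urgent", 3), ("routine", 2), ("self_care", 1), ("unknown", 0)]

-- TRIAGE_RANK.get(str(t.get("level", "unknown")), 0)  (str() is the identity on our String values)
def pvRank (t : List (String × String)) : Int :=
  TRIAGE_RANK.getD ((PySem.Dict.mk t).getD "level" "unknown") 0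

def pick_best_triage_py (triage_list : List (List (String × String))) : List (String × String) :=
  match triage_list with
  | [] => [("level", "unknown"), ("reason", "No matching triage rules.")]
  | best :: rest =>
      -- state: (best, best_rank), loop over triage_list[1:]
      (rest.foldl (fun (acc : List (String × String) × Int) t =>
          let rank := pvRank t
          if acc.2 < rank then (t, rank) else acc)
        (best, pvRank best)).1

-- ===== PORT B =====
def pick_best_triage_py_alt (triage_list : List (List (String × String))) : List (String × String) :=
  match triage_list with
  | [] => [("level", "unknown"), ("reason", "No matching triage rules.")]
  | _ :: _ =>
      let ranks := triage_list.map pvRank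
      match PySem.List.max? ranks (fun y => y) with          -- best_rank = max(ranks)
      | none => []                                            -- unreachable: triage_list ≠ []
      | some best_rank =>
          -- next(t for t, r in zip(triage_list, ranks) if r == best_rank)
          (((triage_list.zip ranks).find? (fun p => p.2 == best_rank)).map Prod.fst).getD []

-- ===== PRECONDITION & SPEC =====
def Spec_pick_best_triage_py (triage_list : List (List (String × String))) (out : List (String × String)) : Prop := out = pick_best_triage_py_alt triage_list
instance (triage_list : List (List (String × String))) (out : List (String × String)) : Decidable (Spec_pick_best_triage_py triage_list out) := by unfold Spec_pick_best_triage_py; infer_instance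

-- ===== CLAIM (what is proved, stated in full; the proofs are below) =====
def Claim_equal_pick_best_triage_py : Prop := ∀ (triage_list : List (List (String × String))), Dom_pick_best_triage_py triage_list → Spec_pick_best_triage_py triage_list (pick_best_triage_py triage_list)

-- ===== LEMMAS AND PROOFS =====

-- A's fold keeps best_rank = pvRank best, so it equals the rank-free scan below.
def pvStep (b t : List (String × String)) : List (String × String) :=
  if pvRank b < pvRank t then t else b

theorem foldA_eq_scan (xs : List (List (String × String))) (b : List (String × String)) :
    (xs.foldl (fun (acc : List (String × String) × Int) t =>
        let rank := pvRank t
        if acc.2 < rank then (t, rank) else acc) (b, pvRank b)).1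
      = xs.foldl pvStep b := by
  induction xs generalizing b with
  | nil => rfl
  | cons x xs ih =>
      simp only [List.foldl_cons, pvStep]
      by_cases h : pvRank b < pvRank x
      · simp only [h, if_true]; exact ih x
      · simp only [h, if_false]; exact ih b

-- A's scan returns the FIRST element whose rank is the running max of all ranks.
theorem scan_eq_first_max (t : List (List (String × String))) (h : List (String × String)) :
    t.foldl pvStep h
      = (((h :: t).find? (fun x => pvRank x == (t.map pvRank).foldl max (pvRank h))).getD []) := by
  induction t generalizing h with
  | nil => simp
  | cons x t ih =>
      simp only [List.foldl_cons, List.map_cons, pvStep]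
      by_cases hc : pvRank h < pvRank x
      · -- best becomes x; h cannot reach the max, so find? skips it
        have hxM : pvRank x ≤ (t.map pvRank).foldl max (pvRank x) :=
          (PySem.List.le_foldl_max _ _).1
        have hmax : max (pvRank h) (pvRank x) = pvRank x := by omega
        have hbh : ¬ ((pvRank h == (t.map pvRank).foldl max (pvRank x)) = true) := by
          simp only [beq_iff_eq]; omega
        rw [if_pos hc, ih x, hmax,
            List.find?_cons_of_neg
              (p := fun y => pvRank y == (t.map pvRank).foldl max (pvRank x)) hbh]
      · -- best stays h; x ≤ h so x cannot be a NEW first max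
        have hmax : max (pvRank h) (pvRank x) = pvRank h := by omega
        rw [if_neg hc, ih h, hmax]
        by_cases hh : pvRank h = (t.map pvRank).foldl max (pvRank h)
        · have hb : (pvRank h == (t.map pvRank).foldl max (pvRank h)) = true := by
            simp only [beq_iff_eq]; exact hh
          simp only [List.find?_cons_of_pos
              (p := fun y => pvRank y == (t.map pvRank).foldl max (pvRank h)) hb]
        · have hhle : pvRank h ≤ (t.map pvRank).foldl max (pvRank h) :=
            (PySem.List.le_foldl_max _ _).1
          have hbh : ¬ ((pvRank h == (t.map pvRank).foldl max (pvRank h)) = true) := by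
            simp only [beq_iff_eq]; omega
          have hbx : ¬ ((pvRank x == (t.map pvRank).foldl max (pvRank h)) = true) := by
            simp only [beq_iff_eq]; omega
          simp only [List.find?_cons_of_neg
              (p := fun y => pvRank y == (t.map pvRank).foldl max (pvRank h)) hbh,
            List.find?_cons_of_neg
              (p := fun y => pvRank y == (t.map pvRank).foldl max (pvRank h)) hbx]

-- zip of a list with its own rank image is the graph map of pvRank
theorem zip_map_rank (t : List (List (String × String))) :
    t.zip (t.map pvRank) = t.map (fun x => (x, pvRank x)) := by
  induction t with
  | nil => rfl
  | cons a t ih => simp [ih]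

-- ===== VERDICT (by name: the statement is the Claim_ definition above) =====
theorem pick_best_triage_py_spec : Claim_equal_pick_best_triage_py := by
  intro tl _
  unfold Spec_pick_best_triage_py pick_best_triage_py pick_best_triage_py_alt
  match tl with
  | [] => rfl
  | h :: t =>
      dsimp only
      rw [foldA_eq_scan, scan_eq_first_max]
      simp only [List.map_cons, PySem.List.max?_id_cons]
      rw [show (h :: t).zip (pvRank h :: t.map pvRank)
            = (h :: t).map (fun x => (x, pvRank x)) from zip_map_rank (h :: t)]
      rw [List.find?_map]
      simp only [Function.comp_def]
      rcases (h :: t).find? (fun x => pvRank x == (t.map pvRank).foldl max (pvRank h)) with _ | v <;>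
        simp
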